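-- pv_equiv track=rewrite | github.com/Kuhron/programming | Language/CognateSegmentLinking.py | convert_binary_into_partition
-- ===== SOURCE A (Python) =====
-- def convert_binary_into_partition(binary, s):
--     # partition s into substrings based on the binary (which says, at each boundary between chars, 1 if put a divide else 0)
--     assert len(binary) == len(s) - 1, f"{s}\t{binary}"
--     res = []
--     current_substr = ""
--     for i in range(len(binary)):
--         # binary bit i goes right after s char i
--         bit = binary[i]
--         char = s[i]
--         current_substr += char
--         if bit == "1":
--             # put a divider
--             res.append(current_substr)
--             current_substr = ""
--         else:
--             assert bit == "0", bit
--             # just add to the substring and continue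
--             continue
--     current_substr += s[-1]
--     res.append(current_substr)
--     return res
-- ===== SOURCE B (Python) =====
-- def convert_binary_into_partition(binary, s):
--     # cut-position pass + slicing, instead of accumulating a current substring
--     assert len(binary) == len(s) - 1, f"{s}\t{binary}"
--     boundaries = [0]
--     for i, bit in enumerate(binary):
--         if bit == "1":
--             boundaries.append(i + 1)
--         else:
--             assert bit == "0", bit
--     boundaries.append(len(s))
--     return [s[boundaries[j]:boundaries[j + 1]] for j in range(len(boundaries) - 1)]
-- ===== Notes on version B (the rewrite author's own statement) =====
-- stated objective: alternative
-- what changed: B makes one pass over binary collecting cut positions and then builds the result by slicing s between consecutive boundaries, instead of accumulating a growing current substring with mid-loop resets.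
import Mathlib
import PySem

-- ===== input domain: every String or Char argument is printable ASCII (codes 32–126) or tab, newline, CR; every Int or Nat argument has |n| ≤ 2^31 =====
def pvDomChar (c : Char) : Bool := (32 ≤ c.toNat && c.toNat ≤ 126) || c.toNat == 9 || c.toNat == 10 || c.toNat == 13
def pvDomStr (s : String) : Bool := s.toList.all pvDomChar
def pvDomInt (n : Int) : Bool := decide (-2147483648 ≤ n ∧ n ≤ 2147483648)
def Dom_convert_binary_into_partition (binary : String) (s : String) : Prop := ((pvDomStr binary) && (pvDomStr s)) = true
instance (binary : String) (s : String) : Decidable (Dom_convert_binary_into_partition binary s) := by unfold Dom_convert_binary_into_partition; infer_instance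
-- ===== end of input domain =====

-- B collects cut positions in one pass and slices s between consecutive boundaries, instead of
-- accumulating a current substring; equivalence is proved on the inputs where A's asserts pass.

-- ===== PORT A =====
-- the for-loop of A: state (res, current_substr); consumes the bits together with the chars of s
-- (faithful under Pre_, where len(binary) == len(s) - 1 so s[i] exists at each step)
def pvALoop (res : List String) (cur : List Char) : List Char → List Char → List String × List Char
  | [], _ => (res, cur)
  | b :: bs, cs =>
      let ch := cs.headD ' '        -- char = s[i]
      let cur' := cur ++ [ch]       -- current_substr += char
      if b = '1' then pvALoop (res ++ [String.ofList cur']) [] bs cs.tail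
      else pvALoop res cur' bs cs.tail   -- assert bit == "0" raises outside Pre_

def convert_binary_into_partition (binary : String) (s : String) : List String :=
  let sl := s.toList
  let p := pvALoop [] [] binary.toList sl
  -- current_substr += s[-1]; res.append(current_substr)  (s nonempty under Pre_)
  p.1 ++ [String.ofList (p.2 ++ [sl.getLastD ' '])]

-- ===== PORT B =====
def convert_binary_into_partition_alt (binary : String) (s : String) : List String :=
  let boundaries : List Int :=
    ((0 : Int) :: (PySem.List.enumerate binary.toList 0).foldl
        (fun (bs : List Int) p => if p.2 = '1' then bs ++ [p.1 + 1] else bs) [])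
      ++ [PySem.Str.len s]
  (List.range (boundaries.length - 1)).map
    (fun j => PySem.Str.slice s (some (boundaries.getD j 0)) (some (boundaries.getD (j + 1) 0)))

-- ===== PRECONDITION & SPEC =====
-- exactly the inputs where A's asserts pass: len(binary) == len(s) - 1 and every bit is '0' or '1'
def Pre_convert_binary_into_partition (binary : String) (s : String) : Prop :=
  (s.toList.length == binary.toList.length + 1
    && binary.toList.all (fun c => c == '0' || c == '1')) = true
instance (binary : String) (s : String) : Decidable (Pre_convert_binary_into_partition binary s) := by
  unfold Pre_convert_binary_into_partition; infer_instance

def pvWitness_convert_binary_into_partition : String × String := ("10", "abc")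

def Spec_convert_binary_into_partition (binary : String) (s : String) (out : List String) : Prop := out = convert_binary_into_partition_alt binary s
instance (binary : String) (s : String) (out : List String) : Decidable (Spec_convert_binary_into_partition binary s out) := by unfold Spec_convert_binary_into_partition; infer_instance

-- ===== CLAIM (what is proved, stated in full; the proofs are below) =====
def Claim_equal_convert_binary_into_partition : Prop := ∀ (binary : String) (s : String), Dom_convert_binary_into_partition binary s → Pre_convert_binary_into_partition binary s → Spec_convert_binary_into_partition binary s (convert_binary_into_partition binary s)

-- ===== LEMMAS AND PROOFS =====

-- cut positions of the bits, starting at bit index i (Nat version of B's boundary pass)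
def pvCuts : List Char → Nat → List Nat
  | [], _ => []
  | b :: bs, i => if b = '1' then (i + 1) :: pvCuts bs (i + 1) else pvCuts bs (i + 1)

-- slicing s between consecutive boundaries (Nat version of B's comprehension)
def pvChop (sl : List Char) : List Nat → List String
  | a :: b :: rest => String.ofList ((sl.drop a).take (b - a)) :: pvChop sl (b :: rest)
  | _ => []

lemma pvFold_eq_cuts (bl : List Char) : ∀ (i : Nat) (acc : List Int),
    (PySem.List.enumerate bl (i : Int)).foldl
        (fun (bs : List Int) p => if p.2 = '1' then bs ++ [p.1 + 1] else bs) acc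
      = acc ++ (pvCuts bl i).map (Nat.cast) := by
  induction bl with
  | nil => intro i acc; simp [PySem.List.enumerate_nil, pvCuts]
  | cons b bs ih =>
    intro i acc
    rw [PySem.List.enumerate_cons]
    have : ((i : Int) + 1) = ((i + 1 : Nat) : Int) := by push_cast; ring
    simp only [List.foldl_cons, this, ih, pvCuts]
    by_cases hb : b = '1' <;> simp [hb]

lemma pvMapRange_eq_chop (s : String) : ∀ (bs : List Nat),
    (List.range ((bs.map (Nat.cast (R := Int))).length - 1)).map
      (fun j => PySem.Str.slice s (some ((bs.map (Nat.cast (R := Int))).getD j 0))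
                                  (some ((bs.map (Nat.cast (R := Int))).getD (j + 1) 0)))
      = pvChop s.toList bs := by
  intro bs
  induction bs with
  | nil => simp [pvChop]
  | cons a rest ih =>
    match rest with
    | [] => simp [pvChop]
    | b :: rest' =>
      rw [show ((a :: b :: rest').map (Nat.cast (R := Int))).length - 1 = rest'.length + 1 by simp,
          List.range_succ_eq_map, List.map_cons, List.map_map]
      simp only [pvChop]
      refine List.cons_eq_cons.mpr ⟨?_, ?_⟩
      · -- head: s[a:b]
        apply String.toList_inj.mp
        simp [PySem.Str.toList_slice, PySem.List.slice_natCast]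
      · -- tail: shift indices by one
        have := ih
        simp only [List.map_cons, List.length_cons, List.length_map, Nat.add_sub_cancel] at this ⊢
        rw [← this]
        apply List.map_congr_left
        intro j _
        simp [Nat.succ_eq_add_one]

lemma pvMain (sl : List Char) : ∀ (bl : List Char) (i a : Nat) (res : List String),
    (∀ c ∈ bl, c = '0' ∨ c = '1') → a ≤ i → i + bl.length + 1 = sl.length →
    (pvALoop res ((sl.drop a).take (i - a)) bl (sl.drop i)).1
        ++ [String.ofList ((pvALoop res ((sl.drop a).take (i - a)) bl (sl.drop i)).2
              ++ [sl.getLastD ' '])]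
      = res ++ pvChop sl (a :: (pvCuts bl i ++ [sl.length])) := by
  intro bl
  induction bl with
  | nil =>
    intro i a res _ hai hlen
    simp at hlen
    simp only [pvALoop, pvCuts, List.nil_append, pvChop]
    have hi : i < sl.length := by omega
    congr 2
    -- take (i-a) ++ [last] = take (sl.length - a) on drop a
    have hd : (sl.drop a).length = sl.length - a := by simp
    have hne' : sl.drop a ≠ [] := by
      intro h; have := congrArg List.length h; simp at this; omega
    have hlast : sl.getLastD ' ' = (sl.drop a).getLastD ' ' := by
      rw [List.getLastD_eq_getLast? , List.getLastD_eq_getLast?,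
          List.getLast?_drop, if_neg (by omega)]
    rw [hlast, show i - a = (sl.drop a).length - 1 by omega,
        show sl.length - a = (sl.drop a).length by omega, List.take_length,
        ← List.dropLast_eq_take, List.getLastD_eq_getLast?,
        List.getLast?_eq_some_getLast hne', Option.getD_some, List.dropLast_append_getLast]
  | cons b bs ih =>
    intro i a res hbits hai hlen
    have hi : i < sl.length := by simp at hlen; omega
    have hdrop : sl.drop i = sl[i] :: sl.drop (i + 1) := List.drop_eq_getElem_cons hi
    have hcur : (sl.drop a).take (i - a) ++ [sl[i]] = (sl.drop a).take (i + 1 - a) := by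
      have h1 : i - a < (sl.drop a).length := by simp; omega
      have h2 : (sl.drop a)[i - a] = sl[i] := by
        rw [List.getElem_drop]; congr 1; omega
      rw [show i + 1 - a = (i - a) + 1 by omega, List.take_add_one,
          List.getElem?_eq_getElem h1, h2]
      rfl
    rw [hdrop]
    simp only [pvALoop, List.headD_cons, List.tail_cons]
    rcases hbits b (by simp) with h0 | h1
    · -- bit '0'
      subst h0
      rw [if_neg (by decide), hcur]
      have := ih (i + 1) a res (fun c hc => hbits c (by simp [hc])) (by omega) (by simp at hlen ⊢; omega)
      rw [this]
      simp [pvCuts]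
    · -- bit '1'
      subst h1
      rw [if_pos rfl, hcur]
      have := ih (i + 1) (i + 1) (res ++ [String.ofList ((sl.drop a).take (i + 1 - a))])
          (fun c hc => hbits c (by simp [hc])) (by omega) (by simp at hlen ⊢; omega)
      rw [show ((sl.drop (i+1)).take (i + 1 - (i + 1))) = ([] : List Char) by simp] at this
      rw [this]
      simp [pvCuts, pvChop, List.cons_append, List.append_assoc]

-- ===== VERDICT (by name: the statement is the Claim_ definition above) =====
theorem convert_binary_into_partition_spec : Claim_equal_convert_binary_into_partition := by
  intro binary s _ hpre
  unfold Pre_convert_binary_into_partition at hpre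
  simp only [Bool.and_eq_true, beq_iff_eq, List.all_eq_true, Bool.or_eq_true] at hpre
  obtain ⟨hlen, hbits⟩ := hpre
  unfold Spec_convert_binary_into_partition
  unfold convert_binary_into_partition convert_binary_into_partition_alt
  simp only []
  have hf := pvFold_eq_cuts binary.toList 0 []
  simp only [Nat.cast_zero, List.nil_append] at hf
  rw [hf]
  have hb : ((0 : Int) :: (pvCuts binary.toList 0).map Nat.cast) ++ [PySem.Str.len s]
      = ((0 :: (pvCuts binary.toList 0 ++ [s.toList.length])).map (Nat.cast (R := Int))) := by
    simp [PySem.Str.len]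
  rw [hb, pvMapRange_eq_chop s (0 :: (pvCuts binary.toList 0 ++ [s.toList.length]))]
  have := pvMain s.toList binary.toList 0 0 [] hbits (le_refl 0) (by omega)
  simp only [Nat.sub_self, List.take_zero, List.drop_zero, List.nil_append] at this
  exact this
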